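-- pv_equiv track=rewrite | github.com/NikhilSetiya/agentscan-security-scanner | terraform/lambda/backup_orchestrator.py | check_backup_health
-- ===== SOURCE A (Python) =====
-- from typing import Dict, Any
--
-- def check_backup_health(backup_results: Dict[str, Any]) -> str:
--     """
--     Analyze backup results and determine overall backup health.
--     """
--     operations = backup_results.get('backup_operations', [])
--
--     if not operations:
--         return 'FAILED'
--
--     failed_operations = [op for op in operations if op.get('status') == 'FAILED']
--     warning_operations = [op for op in operations if op.get('status') == 'WARNING']
--
--     if failed_operations:
--         return 'FAILED'
--     elif warning_operations:
--         return 'WARNING'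
--     else:
--         return 'SUCCESS'
-- ===== SOURCE B (Python) =====
-- from typing import Dict, Any
--
-- def check_backup_health(backup_results: Dict[str, Any]) -> str:
--     operations = backup_results.get('backup_operations', [])
--     if not operations:
--         return 'FAILED'
--     saw_warning = False
--     for op in operations:
--         status = op.get('status')
--         if status == 'FAILED':
--             return 'FAILED'
--         if status == 'WARNING':
--             saw_warning = True
--     return 'WARNING' if saw_warning else 'SUCCESS'
-- ===== Notes on version B (the rewrite author's own statement) =====
-- stated objective: simpler
-- what changed: Replaces the two list-comprehension filtering passes plus emptiness checks with a single short-circuiting loop that returns FAILED immediately and tracks a saw_warning flag.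
import Mathlib
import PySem

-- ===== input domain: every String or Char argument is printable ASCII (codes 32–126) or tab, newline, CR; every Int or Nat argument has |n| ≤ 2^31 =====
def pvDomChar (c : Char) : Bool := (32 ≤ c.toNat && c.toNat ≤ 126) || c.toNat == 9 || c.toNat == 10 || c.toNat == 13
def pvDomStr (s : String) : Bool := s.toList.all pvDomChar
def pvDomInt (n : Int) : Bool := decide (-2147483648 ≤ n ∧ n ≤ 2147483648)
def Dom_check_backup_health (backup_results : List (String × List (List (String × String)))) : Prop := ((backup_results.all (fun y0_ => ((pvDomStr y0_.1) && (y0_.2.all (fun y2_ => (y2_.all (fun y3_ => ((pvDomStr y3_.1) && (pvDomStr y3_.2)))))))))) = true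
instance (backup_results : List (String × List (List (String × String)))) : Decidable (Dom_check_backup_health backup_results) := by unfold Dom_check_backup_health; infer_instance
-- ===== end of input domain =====

-- B replaces A's two filtering passes with a single short-circuiting loop keeping a warning flag (objective: simpler).

-- ===== PORT A =====
def check_backup_health (backup_results : List (String × List (List (String × String)))) : String :=
  let operations := PySem.Dict.getD (PySem.Dict.mk backup_results) "backup_operations" []
  if operations = [] then "FAILED"
  else
    let failed_operations := operations.filter (fun op => PySem.Dict.get? (PySem.Dict.mk op) "status" == some "FAILED")
    let warning_operations := operations.filter (fun op => PySem.Dict.get? (PySem.Dict.mk op) "status" == some "WARNING")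
    if failed_operations ≠ [] then "FAILED"
    else if warning_operations ≠ [] then "WARNING"
    else "SUCCESS"

-- ===== PORT B =====
-- the loop over operations with the saw_warning flag and early return
def checkLoop : List (List (String × String)) → Bool → String
  | [], saw_warning => if saw_warning then "WARNING" else "SUCCESS"
  | op :: rest, saw_warning =>
    let status := PySem.Dict.get? (PySem.Dict.mk op) "status"
    if status == some "FAILED" then "FAILED"
    else checkLoop rest (saw_warning || (status == some "WARNING"))

def check_backup_health_alt (backup_results : List (String × List (List (String × String)))) : String :=
  let operations := PySem.Dict.getD (PySem.Dict.mk backup_results) "backup_operations" []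
  if operations = [] then "FAILED"
  else checkLoop operations false

-- ===== PRECONDITION & SPEC =====
def Spec_check_backup_health (backup_results : List (String × List (List (String × String)))) (out : String) : Prop := out = check_backup_health_alt backup_results
instance (backup_results : List (String × List (List (String × String)))) (out : String) : Decidable (Spec_check_backup_health backup_results out) := by unfold Spec_check_backup_health; infer_instance

-- ===== CLAIM (what is proved, stated in full; the proofs are below) =====
def Claim_equal_check_backup_health : Prop := ∀ (backup_results : List (String × List (List (String × String)))), Dom_check_backup_health backup_results → Spec_check_backup_health backup_results (check_backup_health backup_results)

-- ===== LEMMAS AND PROOFS =====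
theorem checkLoop_char (ops : List (List (String × String))) (saw : Bool) :
    checkLoop ops saw =
      if ops.filter (fun op => PySem.Dict.get? (PySem.Dict.mk op) "status" == some "FAILED") ≠ [] then "FAILED"
      else if saw || (ops.filter (fun op => PySem.Dict.get? (PySem.Dict.mk op) "status" == some "WARNING") ≠ []) then "WARNING"
      else "SUCCESS" := by
  induction ops generalizing saw with
  | nil => simp [checkLoop]
  | cons op rest ih =>
    simp only [checkLoop]
    by_cases hF : PySem.Dict.get? (PySem.Dict.mk op) "status" == some "FAILED"
    · simp [hF]
    · by_cases hW : PySem.Dict.get? (PySem.Dict.mk op) "status" == some "WARNING"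
      · simp [hF, hW, ih]
      · simp [hF, hW, ih]

-- ===== VERDICT (by name: the statement is the Claim_ definition above) =====
theorem check_backup_health_spec : Claim_equal_check_backup_health := by
  intro backup_results _
  unfold Spec_check_backup_health check_backup_health check_backup_health_alt
  by_cases h : PySem.Dict.getD (PySem.Dict.mk backup_results) "backup_operations" [] = []
  · simp [h]
  · simp only [h, checkLoop_char]
    split_ifs <;> simp_all
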